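-- pv_equiv track=rewrite | github.com/GeoscienceAustralia/aem-interpretation-conversion | aemworkflow/commands.py | help_gr8
-- ===== SOURCE A (Python) =====
-- from typing import List, Tuple, TextIO
--
-- def help_gr8(lin_lst: List[str], idx_d0: List[int]) -> List[int]:
--     """
--     Replacing the list comprehension
--     idx_gr8 = [_i for _i, line in enumerate(lin_lst) if line.startswith(">")][1:]
--     to find the first line starting with '>', after a meta '# @D0 ...' line
--     Also removes the 'fake >' from lin_lst
--     """
--     idx_lst = []
--     cnt = 0
--     tmp = lin_lst.copy()
--     for _i, line in enumerate(tmp):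
--         if line.startswith(">") and (_i > idx_d0[cnt]):
--             idx_lst.append(_i)
--             cnt += 1
--     return idx_lst
-- ===== SOURCE B (Python) =====
-- from typing import List
--
--
-- def help_gr8(lin_lst: List[str], idx_d0: List[int]) -> List[int]:
--     # One pass collects the indices of '>' lines; then a marker-driven scan
--     # greedily matches each marker to the next '>' index that exceeds it.
--     gr_idx = [i for i, line in enumerate(lin_lst) if line.startswith(">")]
--     out = []
--     pos = 0
--     for d in idx_d0:
--         while pos < len(gr_idx) and gr_idx[pos] <= d:
--             pos += 1
--         if pos == len(gr_idx):
--             break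
--         out.append(gr_idx[pos])
--         pos += 1
--     return out
-- ===== Notes on version B (the rewrite author's own statement) =====
-- stated objective: alternative
-- what changed: B first collects the indices of '>' lines in one filtered pass, then a marker-driven greedy scan with a position pointer matches each marker of idx_d0 to the next '>' index exceeding it, instead of A's single loop over all lines carrying a counter into idx_d0 (and it drops the vestigial .copy()).
import Mathlib
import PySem

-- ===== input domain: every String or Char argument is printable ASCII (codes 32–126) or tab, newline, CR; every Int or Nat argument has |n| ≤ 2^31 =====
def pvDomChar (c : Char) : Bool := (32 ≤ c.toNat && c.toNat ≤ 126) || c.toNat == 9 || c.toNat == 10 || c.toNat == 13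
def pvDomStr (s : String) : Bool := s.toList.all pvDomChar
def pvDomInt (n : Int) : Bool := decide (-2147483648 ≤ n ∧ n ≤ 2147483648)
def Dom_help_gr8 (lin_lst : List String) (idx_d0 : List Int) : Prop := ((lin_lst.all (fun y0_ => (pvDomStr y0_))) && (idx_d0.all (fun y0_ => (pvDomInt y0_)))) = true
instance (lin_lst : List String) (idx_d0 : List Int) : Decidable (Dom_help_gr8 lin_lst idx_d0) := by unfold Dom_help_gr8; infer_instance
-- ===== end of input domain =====

-- B replaces A's one loop (counter into idx_d0) by a filtered index pass plus a
-- marker-driven greedy scan; same values wherever A returns (alternative decomposition).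


-- ===== PORT A =====
def help_gr8 (lin_lst : List String) (idx_d0 : List Int) : List Int :=
  let tmp := lin_lst  -- tmp = lin_lst.copy() (no mutation happens; return value only)
  ((PySem.List.enumerate tmp).foldl
    (fun (s : List Int × Int) (p : Int × String) =>
      if PySem.Str.startswith p.2 ">" then
        match PySem.List.pyGet? idx_d0 s.2 with
        | some d => if d < p.1 then (s.1 ++ [p.1], s.2 + 1) else s
        | none => s  -- Python raises IndexError here; such inputs are excluded by Pre_help_gr8
      else s)
    ([], 0)).1

-- ===== PORT B =====
-- B's while/pos pointer over gr_idx, rendered as recursion on the remaining suffix of gr_idx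
def help_gr8_loop (gr : List Int) (ds : List Int) : List Int :=
  match gr, ds with
  | _, [] => []
  | [], _ :: _ => []
  | g :: gr', d :: ds' =>
      if g ≤ d then help_gr8_loop gr' (d :: ds') else g :: help_gr8_loop gr' ds'

def help_gr8_alt (lin_lst : List String) (idx_d0 : List Int) : List Int :=
  let gr_idx := ((PySem.List.enumerate lin_lst).filter
      (fun p => PySem.Str.startswith p.2 ">")).map Prod.fst
  help_gr8_loop gr_idx idx_d0

-- ===== PRECONDITION & SPEC =====
-- A raises IndexError iff, with g the '>' indices (m of them) and k = len(idx_d0),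
-- m ≥ k+1 and g[m-1-k+c] > idx_d0[c] for every c < k.  Pre_ is exactly the complement.
def pvRaiseCond (lin_lst : List String) (idx_d0 : List Int) : Bool :=
  let g : List Int := ((PySem.List.enumerate lin_lst).filter
      (fun p => PySem.Str.startswith p.2 ">")).map Prod.fst
  decide (idx_d0.length + 1 ≤ g.length) &&
    (List.range idx_d0.length).all
      (fun c => decide (idx_d0.getD c 0 < g.getD (g.length - 1 - idx_d0.length + c) 0))

-- Pre_ excludes exactly the inputs on which Python A raises IndexError (no returning input is excluded)
def Pre_help_gr8 (lin_lst : List String) (idx_d0 : List Int) : Prop :=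
  pvRaiseCond lin_lst idx_d0 = false
instance (lin_lst : List String) (idx_d0 : List Int) : Decidable (Pre_help_gr8 lin_lst idx_d0) := by
  unfold Pre_help_gr8; infer_instance

def pvWitness_help_gr8 : List String × List Int := (["# @D0 meta", "> line"], [0])

def Spec_help_gr8 (lin_lst : List String) (idx_d0 : List Int) (out : List Int) : Prop := out = help_gr8_alt lin_lst idx_d0
instance (lin_lst : List String) (idx_d0 : List Int) (out : List Int) : Decidable (Spec_help_gr8 lin_lst idx_d0 out) := by unfold Spec_help_gr8; infer_instance

-- ===== CLAIM (what is proved, stated in full; the proofs are below) =====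
def Claim_equal_help_gr8 : Prop := ∀ (lin_lst : List String) (idx_d0 : List Int), Dom_help_gr8 lin_lst idx_d0 → Pre_help_gr8 lin_lst idx_d0 → Spec_help_gr8 lin_lst idx_d0 (help_gr8 lin_lst idx_d0)

-- ===== LEMMAS AND PROOFS =====

-- invariant of A's loop restricted to the '>' indices: with counter n, it appends
-- exactly what B's greedy scan produces on the remaining markers idx.drop n
lemma foldA_eq_loop (idx : List Int) :
    ∀ (gr : List Int) (n : Nat) (acc : List Int),
      (gr.foldl (fun (s : List Int × Int) (g : Int) =>
          match PySem.List.pyGet? idx s.2 with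
          | some d => if d < g then (s.1 ++ [g], s.2 + 1) else s
          | none => s) (acc, (n : Int))).1
        = acc ++ help_gr8_loop gr (idx.drop n) := by
  intro gr
  induction gr with
  | nil =>
      intro n acc
      cases h : idx.drop n with
      | nil => simp [help_gr8_loop]
      | cons d ds => simp [help_gr8_loop]
  | cons g gr' ih =>
      intro n acc
      simp only [List.foldl_cons, PySem.List.pyGet?_natCast]
      cases h : idx[n]? with
      | none =>
          have hlen : idx.length ≤ n := by
            simpa using (List.getElem?_eq_none_iff.mp h)
          have hdrop : idx.drop n = [] := List.drop_eq_nil_of_le hlen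
          rw [hdrop]
          have := ih n acc
          rw [hdrop] at this
          simpa [help_gr8_loop] using this
      | some d =>
          have hn : n < idx.length := by
            by_contra hc
            rw [List.getElem?_eq_none_iff.mpr (by omega)] at h
            simp at h
          have hdrop : idx.drop n = d :: idx.drop (n + 1) := by
            rw [List.drop_eq_getElem_cons hn]
            have : idx[n] = d := by
              have := List.getElem?_eq_getElem hn
              rw [h] at this; exact (Option.some.inj this).symm
            rw [this]
          rw [hdrop]
          dsimp only
          by_cases hlt : d < g
          · have hcast : ((n : Int) + 1) = ((n + 1 : Nat) : Int) := by push_cast; ring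
            rw [if_pos hlt, hcast, ih (n + 1) (acc ++ [g])]
            simp [help_gr8_loop, not_le.mpr hlt, List.append_assoc]
          · rw [if_neg hlt, ih n acc, hdrop]
            simp [help_gr8_loop, le_of_not_gt hlt]

lemma ports_eq (lin_lst : List String) (idx_d0 : List Int) :
    help_gr8 lin_lst idx_d0 = help_gr8_alt lin_lst idx_d0 := by
  have h1 := foldA_eq_loop idx_d0
    (((PySem.List.enumerate lin_lst).filter
        (fun p => PySem.Str.startswith p.2 ">")).map Prod.fst) 0 []
  rw [List.foldl_map] at h1
  rw [List.foldl_filter] at h1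
  simpa [help_gr8, help_gr8_alt] using h1

-- ===== VERDICT (by name: the statement is the Claim_ definition above) =====
theorem help_gr8_spec : Claim_equal_help_gr8 := by
  intro lin_lst idx_d0 _ _
  unfold Spec_help_gr8
  exact ports_eq lin_lst idx_d0
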